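-- pv_equiv track=rewrite | github.com/harshjohar/unacademy_a | assignment_8/simcross.py | vertical_c
-- ===== SOURCE A (Python) =====
-- def vertical_c(maze, row, column):
--     # returns the length of word starting with c and eding with b/c
--     length = 0
--     brackets = 0
--     while brackets < 2 and row < len(maze):
--         if maze[row][column] == '#':
--             break
--         elif maze[row][column] == 'c' or maze[row][column] == 'b':
--             brackets += 1
--             length += 1
--         else:
--             length+=1
--         row += 1
--     return length
-- ===== SOURCE B (Python) =====
-- def _cell(maze, r, column):
--     if not (-len(maze) <= r < len(maze)):
--         return None
--     rw = maze[r]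
--     if not (-len(rw) <= column < len(rw)):
--         return None
--     return rw[column]
--
--
-- def vertical_c(maze, row, column):
--     # Extract the readable column suffix (stopping at the first missing cell),
--     # then combine the first '#' and the second 'b'/'c' marker arithmetically.
--     col = []
--     r = row
--     while r < len(maze):
--         ch = _cell(maze, r, column)
--         if ch is None:
--             break
--         col.append(ch)
--         r += 1
--     w = col.index('#') if '#' in col else len(col)
--     marks = [i for i, ch in enumerate(col) if ch == 'b' or ch == 'c']
--     if len(marks) < 2 or w <= marks[1]:
--         return w
--     return marks[1] + 1
-- ===== Notes on version B (the rewrite author's own statement) =====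
-- stated objective: alternative
-- what changed: Replaces the stateful accumulate-and-break scan (length/brackets counters) by extracting the readable column suffix once (stopping at the first missing cell) and computing the answer in closed form from the first '#' position and the index of the second 'b'/'c' marker.
import Mathlib
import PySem

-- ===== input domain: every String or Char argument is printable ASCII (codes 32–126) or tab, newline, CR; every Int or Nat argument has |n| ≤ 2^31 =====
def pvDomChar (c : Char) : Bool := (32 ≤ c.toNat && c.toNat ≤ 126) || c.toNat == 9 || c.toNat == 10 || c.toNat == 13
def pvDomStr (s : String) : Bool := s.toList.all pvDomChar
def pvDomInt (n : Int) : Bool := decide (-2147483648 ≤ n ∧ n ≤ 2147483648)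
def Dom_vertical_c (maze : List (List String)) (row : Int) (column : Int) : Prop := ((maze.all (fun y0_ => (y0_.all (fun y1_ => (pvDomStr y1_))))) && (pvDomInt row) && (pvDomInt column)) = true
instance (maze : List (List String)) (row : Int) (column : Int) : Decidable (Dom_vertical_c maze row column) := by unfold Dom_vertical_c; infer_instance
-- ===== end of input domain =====

-- B replaces A's stateful accumulate-and-break scan by extracting the readable column
-- suffix once (stopping at the first missing cell) and combining the first '#' position
-- with the second 'b'/'c' marker arithmetically (objective: alternative decomposition).

-- ===== PORT A =====
-- maze[row][column]; Python raises IndexError when out of range: `none` here, excluded by Pre_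
def vcCell (maze : List (List String)) (row column : Int) : Option String :=
  (PySem.List.pyGet? maze row).bind (fun r => PySem.List.pyGet? r column)

-- the while loop of A, state (length, brackets, row)
def vcLoop (maze : List (List String)) (column : Int) (length brackets row : Int) : Int :=
  if _h : brackets < 2 ∧ row < (maze.length : Int) then
    match vcCell maze row column with
    | none => length  -- Python raises here; such inputs are outside Pre_
    | some cell =>
      if cell = "#" then length
      else if cell = "c" ∨ cell = "b" then vcLoop maze column (length + 1) (brackets + 1) (row + 1)
      else vcLoop maze column (length + 1) brackets (row + 1)
  else length
termination_by ((maze.length : Int) - row).toNat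
decreasing_by all_goals omega

def vertical_c (maze : List (List String)) (row : Int) (column : Int) : Int :=
  vcLoop maze column 0 0 row

-- ===== PORT B =====
-- Source B's _cell: explicit Python index-validity checks (negative wraparound included);
-- the inner accesses use pyGet?, exact Python indexing (its none case is unreachable
-- after the bounds check, mirroring that maze[r] cannot raise there)
def altCell (maze : List (List String)) (r column : Int) : Option String :=
  if -(maze.length : Int) ≤ r ∧ r < (maze.length : Int) then
    match PySem.List.pyGet? maze r with
    | none => none
    | some rw =>
      if -(rw.length : Int) ≤ column ∧ column < (rw.length : Int) then
        PySem.List.pyGet? rw column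
      else none
  else none

-- Source B's while loop building `col`: append cells until the end or the first missing cell
def altCol (maze : List (List String)) (column r : Int) : List String :=
  if _h : r < (maze.length : Int) then
    match altCell maze r column with
    | none => []
    | some ch => ch :: altCol maze column (r + 1)
  else []
termination_by ((maze.length : Int) - r).toNat
decreasing_by all_goals omega

def vertical_c_alt (maze : List (List String)) (row : Int) (column : Int) : Int :=
  let col : List String := altCol maze column row
  let w : Int := match PySem.List.index? col "#" with
    | some i => (i : Int)
    | none => (col.length : Int)
  let marks : List Int :=
    ((PySem.List.enumerate col 0).filter (fun p => p.2 = "b" ∨ p.2 = "c")).map (·.1)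
  if marks.length < 2 then w
  else
    let m := PySem.List.pyGetD marks ((1 : Nat) : Int) 0
    if w ≤ m then w else m + 1

-- ===== PRECONDITION & SPEC =====
-- the readable column prefix: cells maze[i][column] for i in range(row, len(maze)),
-- truncated at the first missing cell (stated without the ports)
def truncColOf (maze : List (List String)) (row column : Int) : List String :=
  (((PySem.List.pyRange row (maze.length : Int) 1).map
      (fun r => (PySem.List.pyGet? maze r).bind (fun rw => PySem.List.pyGet? rw column))).takeWhile
    (fun o => o.isSome)).map (fun o => o.getD "")

def markCount (col : List String) : Nat :=
  (col.filter (fun c => decide (c = "b" ∨ c = "c"))).length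

-- Pre_ holds exactly when A returns normally: the scan is empty (row past the end), or it
-- starts at a valid index and stops at a '#' or at a second 'b'/'c' marker before any
-- missing cell, or every scanned cell exists. Outside Pre_ A raises IndexError (no value
-- is returned); B still returns a value there.
def Pre_vertical_c (maze : List (List String)) (row : Int) (column : Int) : Prop :=
  (maze.length : Int) ≤ row ∨
    (-(maze.length : Int) ≤ row ∧
      ("#" ∈ truncColOf maze row column ∨ 2 ≤ markCount (truncColOf maze row column) ∨
        ∀ i ∈ PySem.List.pyRange row (maze.length : Int) 1,
          ((PySem.List.pyGet? maze i).bind (fun rw => PySem.List.pyGet? rw column)).isSome = true))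
instance (maze : List (List String)) (row : Int) (column : Int) : Decidable (Pre_vertical_c maze row column) := by unfold Pre_vertical_c; infer_instance

def pvWitness_vertical_c : List (List String) × Int × Int := ([["c"], ["x"], ["b"], ["#"]], 0, 0)

def Spec_vertical_c (maze : List (List String)) (row : Int) (column : Int) (out : Int) : Prop := out = vertical_c_alt maze row column
instance (maze : List (List String)) (row : Int) (column : Int) (out : Int) : Decidable (Spec_vertical_c maze row column out) := by unfold Spec_vertical_c; infer_instance

-- ===== CLAIM (what is proved, stated in full; the proofs are below) =====
def Claim_equal_vertical_c : Prop := ∀ (maze : List (List String)) (row : Int) (column : Int), Dom_vertical_c maze row column → Pre_vertical_c maze row column → Spec_vertical_c maze row column (vertical_c maze row column)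


-- ===== LEMMAS AND PROOFS =====

-- spec recursion: scanned length when k markers are still wanted
def scanF : List String → Nat → Int
  | _, 0 => 0
  | [], _ + 1 => 0
  | x :: xs, k + 1 =>
      if x = "#" then 0
      else if x = "c" ∨ x = "b" then 1 + scanF xs k
      else 1 + scanF xs (k + 1)

theorem scanF_nil (k : Nat) : scanF [] k = 0 := by cases k <;> simp [scanF]
theorem scanF_zero (xs : List String) : scanF xs 0 = 0 := by cases xs <;> simp [scanF]

-- Source B's _cell checks exactly Python's index validity: it computes pyGet? ∘ pyGet?
theorem altCell_eq (maze : List (List String)) (r column : Int) :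
    altCell maze r column = (PySem.List.pyGet? maze r).bind (fun rw => PySem.List.pyGet? rw column) := by
  unfold altCell
  by_cases hr : -(maze.length : Int) ≤ r ∧ r < (maze.length : Int)
  · rw [if_pos hr]
    cases hm : PySem.List.pyGet? maze r with
    | none =>
      exact absurd ((PySem.List.pyGet?_eq_none_iff maze r).mp hm)
        (by simp [PySem.Raise.InRange]; omega)
    | some rw =>
      show (if -((rw.length : Int)) ≤ column ∧ column < (rw.length : Int) then
          PySem.List.pyGet? rw column else none) = PySem.List.pyGet? rw column
      by_cases hc : -((rw.length : Int)) ≤ column ∧ column < (rw.length : Int)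
      · rw [if_pos hc]
      · rw [if_neg hc,
          (PySem.List.pyGet?_eq_none_iff rw column).mpr (by simp [PySem.Raise.InRange]; omega)]
  · rw [if_neg hr,
      (PySem.List.pyGet?_eq_none_iff maze r).mpr (by simp [PySem.Raise.InRange]; omega)]
    rfl

-- B's three quantities, as standalone functions of the column
def cfW (col : List String) : Int :=
  match PySem.List.index? col "#" with
  | some i => (i : Int)
  | none => (col.length : Int)

def cfMarks (col : List String) : List Int :=
  ((PySem.List.enumerate col 0).filter (fun p => p.2 = "b" ∨ p.2 = "c")).map (·.1)

def cf (col : List String) (k : Nat) : Int :=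
  if (cfMarks col).length < k then cfW col
  else
    let m := (cfMarks col)[k - 1]?.getD 0
    if cfW col ≤ m then cfW col else m + 1

-- B's column builder equals the port-free truncated column of Pre_
theorem altCol_eq_trunc (maze : List (List String)) (column r : Int) :
    altCol maze column r = truncColOf maze r column := by
  by_cases h : r < (maze.length : Int)
  · have hrange := PySem.List.pyRange_one_cons (a := r) (b := (maze.length : Int)) h
    cases hc : (PySem.List.pyGet? maze r).bind (fun rw => PySem.List.pyGet? rw column) with
    | none =>
      rw [altCol, dif_pos h, (altCell_eq maze r column).trans hc]
      unfold truncColOf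
      rw [hrange]
      simp [hc]
    | some v =>
      rw [altCol, dif_pos h, (altCell_eq maze r column).trans hc,
          altCol_eq_trunc maze column (r + 1)]
      unfold truncColOf
      rw [hrange]
      simp [hc]
  · rw [altCol, dif_neg h]
    unfold truncColOf
    rw [PySem.List.pyRange_one_eq_nil (by omega)]
    rfl
termination_by ((maze.length : Int) - r).toNat
decreasing_by all_goals omega

theorem markCount_cons (x : String) (xs : List String) :
    markCount (x :: xs) = (if x = "b" ∨ x = "c" then 1 else 0) + markCount xs := by
  unfold markCount
  rw [List.filter_cons]
  by_cases h : x = "b" ∨ x = "c"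
  · rw [if_pos (by simpa using h), if_pos h]
    simp [Nat.add_comm]
  · rw [if_neg (by simpa using h), if_neg h]
    simp

-- A's loop equals scanF on B's (truncated) column, under the invariant that a '#' or
-- enough markers occur before the first missing cell — or no cell is missing at all
theorem loopA_eq (maze : List (List String)) (column : Int) (L b row : Int)
    (hp : "#" ∈ altCol maze column row ∨ (2 - b).toNat ≤ markCount (altCol maze column row) ∨
      ∀ i ∈ PySem.List.pyRange row (maze.length : Int) 1,
        ((PySem.List.pyGet? maze i).bind (fun rw => PySem.List.pyGet? rw column)).isSome = true) :
    vcLoop maze column L b row = L + scanF (altCol maze column row) (2 - b).toNat := by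
  by_cases hg : b < 2 ∧ row < (maze.length : Int)
  · cases hc : vcCell maze row column with
    | none =>
      exfalso
      have hnil : altCol maze column row = [] := by
        rw [altCol, dif_pos hg.2, (altCell_eq maze row column).trans hc]
      rcases hp with h | h | h
      · simp [hnil] at h
      · rw [hnil] at h
        simp [markCount] at h
        omega
      · have hmem : row ∈ PySem.List.pyRange row (maze.length : Int) 1 :=
          PySem.List.mem_pyRange_one.mpr ⟨le_refl _, hg.2⟩
        have := h row hmem
        unfold vcCell at hc
        rw [hc] at this
        simp at this
    | some cell =>
      have hcons : altCol maze column row = cell :: altCol maze column (row + 1) := by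
        rw [altCol, dif_pos hg.2, (altCell_eq maze row column).trans hc]
      have hstep : vcLoop maze column L b row =
          if cell = "#" then L
          else if cell = "c" ∨ cell = "b" then vcLoop maze column (L + 1) (b + 1) (row + 1)
          else vcLoop maze column (L + 1) b (row + 1) := by
        rw [vcLoop, dif_pos hg, hc]
      obtain ⟨k', hk⟩ : ∃ k', (2 - b).toNat = k' + 1 := ⟨(2 - b).toNat - 1, by omega⟩
      by_cases hH : cell = "#"
      · rw [hstep, if_pos hH, hcons, hk]
        simp [scanF, hH]
      · by_cases hM : cell = "c" ∨ cell = "b"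
        · have hM' : cell = "b" ∨ cell = "c" := hM.symm
          have hp' : "#" ∈ altCol maze column (row + 1) ∨
              (2 - (b + 1)).toNat ≤ markCount (altCol maze column (row + 1)) ∨
              ∀ i ∈ PySem.List.pyRange (row + 1) (maze.length : Int) 1,
                ((PySem.List.pyGet? maze i).bind (fun rw => PySem.List.pyGet? rw column)).isSome = true := by
            rcases hp with h | h | h
            · left; rw [hcons] at h; rcases List.mem_cons.mp h with h | h
              · exact absurd h.symm hH
              · exact h
            · right; left
              rw [hcons, markCount_cons, if_pos hM'] at h
              omega
            · right; right
              intro i hi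
              have hi' := PySem.List.mem_pyRange_one.mp hi
              exact h i (PySem.List.mem_pyRange_one.mpr ⟨by omega, hi'.2⟩)
          rw [hstep, if_neg hH, if_pos hM, loopA_eq maze column (L + 1) (b + 1) (row + 1) hp',
              hcons, hk]
          have hk' : k' = (2 - (b + 1)).toNat := by omega
          simp only [scanF, if_neg hH, if_pos hM, hk']
          ring
        · have hM' : ¬ (cell = "b" ∨ cell = "c") := by tauto
          have hp' : "#" ∈ altCol maze column (row + 1) ∨
              (2 - b).toNat ≤ markCount (altCol maze column (row + 1)) ∨
              ∀ i ∈ PySem.List.pyRange (row + 1) (maze.length : Int) 1,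
                ((PySem.List.pyGet? maze i).bind (fun rw => PySem.List.pyGet? rw column)).isSome = true := by
            rcases hp with h | h | h
            · left; rw [hcons] at h; rcases List.mem_cons.mp h with h | h
              · exact absurd h.symm hH
              · exact h
            · right; left
              rw [hcons, markCount_cons, if_neg hM'] at h
              omega
            · right; right
              intro i hi
              have hi' := PySem.List.mem_pyRange_one.mp hi
              exact h i (PySem.List.mem_pyRange_one.mpr ⟨by omega, hi'.2⟩)
          rw [hstep, if_neg hH, if_neg hM, loopA_eq maze column (L + 1) b (row + 1) hp',
              hcons, hk]
          simp only [scanF, if_neg hH, if_neg hM, ← hk]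
          ring
  · rw [vcLoop, dif_neg hg]
    by_cases hb : b < 2
    · have hnil : altCol maze column row = [] := by
        rw [altCol, dif_neg (by omega : ¬ row < (maze.length : Int))]
      rw [hnil, scanF_nil]
      ring
    · rw [show (2 - b).toNat = 0 by omega, scanF_zero]
      ring
termination_by ((maze.length : Int) - row).toNat
decreasing_by all_goals omega

theorem marks_shift (xs : List String) (s : Int) :
    ((PySem.List.enumerate xs s).filter (fun p => p.2 = "b" ∨ p.2 = "c")).map (·.1)
    = (((PySem.List.enumerate xs 0).filter (fun p => p.2 = "b" ∨ p.2 = "c")).map (·.1)).map (· + s) := by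
  induction xs generalizing s with
  | nil => simp [PySem.List.enumerate]
  | cons x xs ih =>
    rw [PySem.List.enumerate_cons, PySem.List.enumerate_cons]
    simp only [zero_add, List.filter_cons, decide_eq_true_eq]
    split_ifs with hP
    · simp only [List.map_cons]
      rw [ih (s + 1), ih 1]
      simp [List.map_map, Function.comp_def, add_comm, add_left_comm]
    · rw [ih (s + 1), ih 1]
      simp [List.map_map, Function.comp_def, add_comm, add_left_comm]

theorem cfMarks_cons (x : String) (xs : List String) :
    cfMarks (x :: xs) = (if x = "b" ∨ x = "c" then [(0 : Int)] else []) ++ (cfMarks xs).map (· + 1) := by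
  unfold cfMarks
  rw [PySem.List.enumerate_cons, List.filter_cons]
  simp only [zero_add, decide_eq_true_eq]
  split_ifs with hP
  · simp only [List.map_cons]
    rw [marks_shift xs 1]
    simp
  · rw [marks_shift xs 1]
    simp

theorem cfMarks_nonneg (col : List String) : ∀ m ∈ cfMarks col, 0 ≤ m := by
  induction col with
  | nil => simp [cfMarks, PySem.List.enumerate]
  | cons x xs ih =>
    rw [cfMarks_cons]
    intro m hm
    rcases List.mem_append.mp hm with h | h
    · split at h <;> simp_all
    · obtain ⟨m0, hm0, rfl⟩ := List.mem_map.mp h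
      have := ih m0 hm0; omega

theorem cfW_nonneg (col : List String) : 0 ≤ cfW col := by
  unfold cfW; split <;> positivity

theorem cfW_cons_hash (xs : List String) : cfW ("#" :: xs) = 0 := by
  unfold cfW; rw [PySem.List.index?_cons_self]; rfl

theorem cfW_cons_ne (x : String) (xs : List String) (h : x ≠ "#") : cfW (x :: xs) = 1 + cfW xs := by
  unfold cfW
  rw [PySem.List.index?_cons_of_ne _ h]
  cases hix : PySem.List.index? xs "#" <;> simp <;> omega

theorem cf_eq_scanF (col : List String) (k : Nat) (h1 : 1 ≤ k) (h2 : k ≤ 2) :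
    cf col k = scanF col k := by
  induction col generalizing k with
  | nil =>
    rw [scanF_nil]
    unfold cf
    have : cfMarks [] = [] := by simp [cfMarks, PySem.List.enumerate]
    rw [this]
    simp [cfW, PySem.List.index?]
  | cons x xs ih =>
    obtain ⟨k', rfl⟩ : ∃ k', k = k' + 1 := ⟨k - 1, by omega⟩
    by_cases hH : x = "#"
    · subst hH
      have hs : scanF ("#" :: xs) (k' + 1) = 0 := by simp [scanF]
      rw [hs]
      unfold cf
      rw [cfW_cons_hash]
      split
      · rfl
      · have hm : 0 ≤ (cfMarks ("#" :: xs))[k' + 1 - 1]?.getD 0 := by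
          cases hg : (cfMarks ("#" :: xs))[k' + 1 - 1]? with
          | none => simp
          | some v =>
            have := cfMarks_nonneg ("#" :: xs) v (List.mem_of_getElem? hg)
            simpa using this
        rw [if_pos hm]
    · by_cases hM : x = "c" ∨ x = "b"
      · have hP : x = "b" ∨ x = "c" := hM.symm
        have hmarks := cfMarks_cons x xs
        rw [if_pos hP] at hmarks
        have hwc := cfW_cons_ne x xs hH
        rcases Nat.eq_or_lt_of_le h1 with hk1 | hk2'
        · -- k = 1
          have : k' = 0 := by omega
          subst this
          have hs : scanF (x :: xs) 1 = 1 := by simp [scanF, hH, hM, scanF_zero]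
          rw [hs]
          unfold cf
          rw [hmarks, hwc]
          have hlen : ¬ ((([(0:Int)] ++ (cfMarks xs).map (· + 1))).length < 1) := by simp
          rw [if_neg hlen]
          have hget : (([(0:Int)] ++ (cfMarks xs).map (· + 1)))[1 - 1]?.getD 0 = 0 := by simp
          rw [hget]
          have := cfW_nonneg xs
          have hn : ¬ (1 + cfW xs ≤ 0) := by omega
          rw [if_neg hn]
          simp
        · -- k = 2
          have : k' = 1 := by omega
          subst this
          have hs : scanF (x :: xs) 2 = 1 + scanF xs 1 := by simp [scanF, hH, hM]
          rw [hs, ← ih 1 (by omega) (by omega)]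
          unfold cf
          rw [hmarks, hwc]
          by_cases hL : (cfMarks xs).length = 0
          · have hnil : cfMarks xs = [] := List.eq_nil_of_length_eq_zero hL
            rw [hnil]
            simp
          · have hlen2 : ¬ (([(0:Int)] ++ (cfMarks xs).map (· + 1)).length < 2) := by
              simp only [List.length_append, List.length_cons, List.length_map, List.length_nil]
              omega
            have hlen1 : ¬ ((cfMarks xs).length < 1) := by omega
            rw [if_neg hlen2, if_neg hlen1]
            have hget : (([(0:Int)] ++ (cfMarks xs).map (· + 1)))[2 - 1]?.getD 0
                = (cfMarks xs)[1 - 1]?.getD 0 + 1 := by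
              have h0 : 0 < (cfMarks xs).length := by omega
              rw [show (2 - 1 : Nat) = 1 from rfl, show (1 - 1 : Nat) = 0 from rfl]
              rw [List.getElem?_append_right (by simp)]
              simp only [List.length_cons, List.length_nil, Nat.sub_self, List.getElem?_map]
              rw [List.getElem?_eq_getElem h0]
              simp
            rw [hget]
            set m0 := (cfMarks xs)[1 - 1]?.getD 0 with hm0
            by_cases hcmp : cfW xs ≤ m0
            · rw [if_pos (by omega : 1 + cfW xs ≤ m0 + 1), if_pos hcmp]
            · rw [if_neg (by omega : ¬ (1 + cfW xs ≤ m0 + 1)), if_neg hcmp]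
              ring
      · -- plain cell
        have hP : ¬ (x = "b" ∨ x = "c") := by tauto
        have hmarks := cfMarks_cons x xs
        rw [if_neg hP] at hmarks
        simp only [List.nil_append] at hmarks
        have hwc := cfW_cons_ne x xs hH
        have hs : scanF (x :: xs) (k' + 1) = 1 + scanF xs (k' + 1) := by
          simp [scanF, hH, hM]
        rw [hs, ← ih (k' + 1) (by omega) (by omega)]
        unfold cf
        rw [hmarks, hwc]
        simp only [List.length_map]
        by_cases hL : (cfMarks xs).length < k' + 1
        · rw [if_pos hL, if_pos hL]
        · rw [if_neg hL, if_neg hL]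
          have hlt : k' + 1 - 1 < (cfMarks xs).length := by omega
          have hget : ((cfMarks xs).map (· + 1))[k' + 1 - 1]?.getD 0
              = (cfMarks xs)[k' + 1 - 1]?.getD 0 + 1 := by
            simp only [List.getElem?_map]
            rw [List.getElem?_eq_getElem hlt]
            simp
          rw [hget]
          set m0 := (cfMarks xs)[k' + 1 - 1]?.getD 0 with hm0
          by_cases hcmp : cfW xs ≤ m0
          · rw [if_pos (by omega : 1 + cfW xs ≤ m0 + 1), if_pos hcmp]
          · rw [if_neg (by omega : ¬ (1 + cfW xs ≤ m0 + 1)), if_neg hcmp]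
            ring

theorem alt_eq_cf (maze : List (List String)) (row column : Int) :
    vertical_c_alt maze row column = cf (altCol maze column row) 2 := by
  unfold vertical_c_alt cf cfW cfMarks
  have hg : ∀ (l : List Int), PySem.List.pyGetD l ((1 : Nat) : Int) 0 = l[2 - 1]?.getD 0 := by
    intro l
    have h1 : PySem.List.pyGet? l ((1 : Nat) : Int) = l[(1 : Nat)]? := PySem.List.pyGet?_natCast l 1
    push_cast at h1
    simp [PySem.List.pyGetD, h1]
  simp only [hg]

-- ===== VERDICT (by name: the statement is the Claim_ definition above) =====
theorem vertical_c_spec : Claim_equal_vertical_c := by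
  intro maze row column _ hpre
  unfold Spec_vertical_c vertical_c
  have hp : "#" ∈ altCol maze column row ∨
      (2 - (0 : Int)).toNat ≤ markCount (altCol maze column row) ∨
      ∀ i ∈ PySem.List.pyRange row (maze.length : Int) 1,
        ((PySem.List.pyGet? maze i).bind (fun rw => PySem.List.pyGet? rw column)).isSome = true := by
    rcases hpre with hge | ⟨_, h3⟩
    · right; right
      intro i hi
      have := PySem.List.mem_pyRange_one.mp hi
      omega
    · rw [altCol_eq_trunc]
      exact h3
  rw [alt_eq_cf maze row column,
      loopA_eq maze column 0 0 row hp,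
      cf_eq_scanF (altCol maze column row) 2 (by omega) (by omega)]
  rw [show ((2 : Int) - 0).toNat = 2 from rfl]
  ring
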